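-- pv_equiv track=rewrite | github.com/pypi-data/pypi-mirror-176 | packages/ParserLexicalAnalyzer/ParserLexicalAnalyzer-1.1.1-py3-none-any.whl/ParserLexicalAnalyzer/PropertyParser/LexicalAnalyzer.py | isRelationalOperator
-- ===== SOURCE A (Python) =====
-- def isRelationalOperator(string):
--     st = 0
--     for i in range(0, len(string)):
--         if st == 0:
--             if string[i] == '<' or string[i] == '>':
--                 st = 1
--             else:
--                 return False
--         elif st == 1:
--             if string[i] == '=':
--                 st = 2
--             else:
--                 return True
--
--         elif st == 2:
--             return True
--     return False
-- ===== SOURCE B (Python) =====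
-- def isRelationalOperator(string):
--     n = len(string)
--     if n == 0 or string[0] not in ('<', '>') or n == 1:
--         return False
--     if string[1] == '=':
--         return n >= 3
--     return True
-- ===== Notes on version B (the rewrite author's own statement) =====
-- stated objective: simpler
-- what changed: Replaced the per-character state-machine loop with direct closed-form length/first-two-character guards (no loop, no state variable).
import Mathlib
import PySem

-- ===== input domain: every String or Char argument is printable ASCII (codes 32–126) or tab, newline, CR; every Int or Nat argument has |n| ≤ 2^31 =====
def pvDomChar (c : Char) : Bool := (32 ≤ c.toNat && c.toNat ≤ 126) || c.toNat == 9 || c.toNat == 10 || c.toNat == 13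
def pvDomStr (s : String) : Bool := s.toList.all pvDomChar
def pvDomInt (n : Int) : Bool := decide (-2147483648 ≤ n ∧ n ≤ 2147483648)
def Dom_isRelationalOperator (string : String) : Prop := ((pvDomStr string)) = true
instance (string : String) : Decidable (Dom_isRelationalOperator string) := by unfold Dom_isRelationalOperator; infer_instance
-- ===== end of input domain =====

-- B replaces A's per-character state-machine loop with closed-form length/index guards (objective: simpler).

-- ===== PORT A =====
-- the for-loop over string with early returns, as structural recursion over the remaining characters with state st
def isRelationalOperatorLoop : List Char → Nat → Bool
  | [], _ => false                                  -- loop finished: return False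
  | c :: rest, st =>
    if st = 0 then
      if c = '<' ∨ c = '>' then isRelationalOperatorLoop rest 1 else false
    else if st = 1 then
      if c = '=' then isRelationalOperatorLoop rest 2 else true
    else true                                        -- st == 2: return True

def isRelationalOperator (string : String) : Bool :=
  isRelationalOperatorLoop string.toList 0

-- ===== PORT B =====
def isRelationalOperator_alt (string : String) : Bool :=
  let l := string.toList
  let n := l.length
  if n = 0 ∨ ¬ (l.getD 0 ' ' = '<' ∨ l.getD 0 ' ' = '>') ∨ n = 1 then false
  else if l.getD 1 ' ' = '=' then decide (3 ≤ n)
  else true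

-- ===== PRECONDITION & SPEC =====
def Spec_isRelationalOperator (string : String) (out : Bool) : Prop := out = isRelationalOperator_alt string
instance (string : String) (out : Bool) : Decidable (Spec_isRelationalOperator string out) := by unfold Spec_isRelationalOperator; infer_instance

-- ===== CLAIM (what is proved, stated in full; the proofs are below) =====
def Claim_equal_isRelationalOperator : Prop := ∀ (string : String), Dom_isRelationalOperator string → Spec_isRelationalOperator string (isRelationalOperator string)

-- ===== LEMMAS AND PROOFS =====
theorem loop_eq_alt (s : String) :
    isRelationalOperatorLoop s.toList 0 = isRelationalOperator_alt s := by
  unfold isRelationalOperator_alt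
  generalize s.toList = l
  match l with
  | [] => rfl
  | [a] =>
    by_cases ha : a = '<' ∨ a = '>' <;> simp [isRelationalOperatorLoop, ha]
  | a :: b :: rest =>
    by_cases ha : a = '<' ∨ a = '>'
    · by_cases hb : b = '='
      · cases rest <;> simp [ha, hb, isRelationalOperatorLoop]
      · simp [ha, hb, isRelationalOperatorLoop]
    · simp [isRelationalOperatorLoop, ha]

-- ===== VERDICT (by name: the statement is the Claim_ definition above) =====
theorem isRelationalOperator_spec : Claim_equal_isRelationalOperator := by
  intro s _
  unfold Spec_isRelationalOperator isRelationalOperator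
  exact loop_eq_alt s
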